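-- pv_equiv track=rewrite | github.com/lnadi17/fluffy-computer | examples/display_picture_examples/helper_scripts_and_files/swatch_generator.py | gen_colors
-- ===== SOURCE A (Python) =====
-- def gen_colors(value_set, size, color_codes):
--     if size == 1:
--         for val in value_set:
--             color_codes.append(val)
--         return color_codes
--     else:
--         for val in value_set:
--             new_codes = []
--             for new_val in gen_colors(value_set, size - 1, new_codes):
--                 color_codes.append(val + new_val)
--         return color_codes
-- ===== SOURCE B (Python) =====
-- def gen_colors(value_set, size, color_codes):
--     # Iterative: build the product of `size` copies of value_set once per level,
--     # reusing the previous level instead of recomputing it for every val.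
--     # Like A, extends color_codes in place and returns it.
--     result = list(value_set)
--     for _ in range(size - 1):
--         result = [v + w for v in value_set for w in result]
--     color_codes.extend(result)
--     return color_codes
-- ===== Notes on version B (the rewrite author's own statement) =====
-- stated objective: faster
-- what changed: Replaces the recursion that rebuilds the (size-1)-product from scratch for every element of value_set by an iterative loop that builds each level's product once and reuses it.
import Mathlib
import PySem

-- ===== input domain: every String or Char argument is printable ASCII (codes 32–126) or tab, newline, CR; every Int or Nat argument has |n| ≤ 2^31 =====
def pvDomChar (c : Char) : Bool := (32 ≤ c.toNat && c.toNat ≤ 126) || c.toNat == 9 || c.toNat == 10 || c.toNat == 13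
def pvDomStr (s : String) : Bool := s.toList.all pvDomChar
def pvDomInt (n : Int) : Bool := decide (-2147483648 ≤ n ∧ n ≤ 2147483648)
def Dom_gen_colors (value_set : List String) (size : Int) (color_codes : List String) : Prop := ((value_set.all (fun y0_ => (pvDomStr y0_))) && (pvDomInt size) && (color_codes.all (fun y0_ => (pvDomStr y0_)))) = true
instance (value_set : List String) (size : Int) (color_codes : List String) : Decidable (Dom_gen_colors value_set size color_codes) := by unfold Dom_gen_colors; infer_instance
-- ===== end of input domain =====

-- B replaces A's per-element recursion by an iterative once-per-level product build (faster);
-- both Pythons extend color_codes in place; the equivalence proved here is about the return value.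


-- ===== PORT A =====
def gen_colors (value_set : List String) (size : Int) (color_codes : List String) : List String :=
  if size = 1 then
    value_set.foldl (fun cc val => cc ++ [val]) color_codes
  else if size < 1 then
    color_codes  -- totality guard: the Python recurses forever here (RecursionError); outside Pre_
  else
    value_set.foldl (fun cc val =>
      (gen_colors value_set (size - 1) []).foldl (fun cc2 new_val => cc2 ++ [val ++ new_val]) cc)
      color_codes
termination_by size.toNat
decreasing_by omega

-- ===== PORT B =====
def gen_colors_alt (value_set : List String) (size : Int) (color_codes : List String) : List String :=
  let result := (PySem.List.pyRange 0 (size - 1) 1).foldl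
    (fun result _ => value_set.flatMap (fun v => result.map (fun w => v ++ w))) value_set
  color_codes ++ result

-- ===== PRECONDITION & SPEC =====
-- Pre_ excludes size ≤ 0, on which the Python A recurses without a base case and raises RecursionError.
def Pre_gen_colors (value_set : List String) (size : Int) (color_codes : List String) : Prop := 1 ≤ size
instance (value_set : List String) (size : Int) (color_codes : List String) : Decidable (Pre_gen_colors value_set size color_codes) := by unfold Pre_gen_colors; infer_instance
def pvWitness_gen_colors : List String × Int × List String := (["a", "b"], 2, ["x"])

def Spec_gen_colors (value_set : List String) (size : Int) (color_codes : List String) (out : List String) : Prop := out = gen_colors_alt value_set size color_codes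
instance (value_set : List String) (size : Int) (color_codes : List String) (out : List String) : Decidable (Spec_gen_colors value_set size color_codes out) := by unfold Spec_gen_colors; infer_instance

-- ===== CLAIM (what is proved, stated in full; the proofs are below) =====
def Claim_equal_gen_colors : Prop := ∀ (value_set : List String) (size : Int) (color_codes : List String), Dom_gen_colors value_set size color_codes → Pre_gen_colors value_set size color_codes → Spec_gen_colors value_set size color_codes (gen_colors value_set size color_codes)

-- ===== LEMMAS AND PROOFS =====
-- one product step: prefix every element of r with every element of vs
def pvStep (vs : List String) (r : List String) : List String :=
  vs.flatMap (fun v => r.map (fun w => v ++ w))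

theorem pv_foldl_snoc {α β : Type} (f : α → β) :
    ∀ (l : List α) (init : List β), l.foldl (fun a x => a ++ [f x]) init = init ++ l.map f := by
  intro l
  induction l with
  | nil => simp
  | cons x xs ih => intro init; simp [ih]

theorem pv_foldl_app {α β : Type} (g : α → List β) :
    ∀ (l : List α) (init : List β), l.foldl (fun a x => a ++ g x) init = init ++ l.flatMap g := by
  intro l
  induction l with
  | nil => simp
  | cons x xs ih => intro init; simp [ih]

theorem pv_genA (vs : List String) :
    ∀ (k : Nat) (cc : List String),
      gen_colors vs ((k : Int) + 1) cc = cc ++ (pvStep vs)^[k] vs := by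
  intro k
  induction k with
  | zero =>
    intro cc
    rw [gen_colors]
    simp [pv_foldl_snoc (fun v : String => v)]
  | succ k ih =>
    intro cc
    have hc : ((k + 1 : Nat) : Int) + 1 = (k : Int) + 1 + 1 := by push_cast; ring
    rw [hc, gen_colors]
    have h1 : ¬ ((k : Int) + 1 + 1 = 1) := by omega
    have h2 : ¬ ((k : Int) + 1 + 1 < 1) := by omega
    simp only [h1, h2, if_false]
    have hsub : (k : Int) + 1 + 1 - 1 = (k : Int) + 1 := by ring
    rw [hsub]
    have hrec : gen_colors vs ((k : Int) + 1) [] = (pvStep vs)^[k] vs := by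
      simpa using ih []
    rw [hrec]
    have hfold : ∀ (cc : List String),
        vs.foldl (fun cc val =>
          ((pvStep vs)^[k] vs).foldl (fun cc2 nv => cc2 ++ [val ++ nv]) cc) cc
        = cc ++ pvStep vs ((pvStep vs)^[k] vs) := by
      intro cc
      have := pv_foldl_app (fun val : String => ((pvStep vs)^[k] vs).map (fun w => val ++ w)) vs cc
      rw [pvStep, ← this]
      apply PySem.List.foldl_congr_mem
      intro a x _
      exact pv_foldl_snoc (fun nv : String => x ++ nv) _ a
    rw [hfold, Function.iterate_succ_apply']

theorem pv_foldl_iterate {α : Type} (step : List String → List String) :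
    ∀ (l : List α) (init : List String),
      l.foldl (fun r _ => step r) init = step^[l.length] init := by
  intro l
  induction l with
  | nil => simp
  | cons x xs ih => intro init; simp [ih, Function.iterate_succ_apply]

theorem pv_genB (vs : List String) (size : Int) (cc : List String) :
    gen_colors_alt vs size cc = cc ++ (pvStep vs)^[(size - 1).toNat] vs := by
  show cc ++ (PySem.List.pyRange 0 (size - 1) 1).foldl (fun r _ => pvStep vs r) vs = _
  rw [pv_foldl_iterate (pvStep vs) (PySem.List.pyRange 0 (size - 1) 1) vs,
    PySem.List.length_pyRange_one]
  norm_num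

-- ===== VERDICT (by name: the statement is the Claim_ definition above) =====
theorem gen_colors_spec : Claim_equal_gen_colors := by
  intro vs size cc _ hpre
  unfold Spec_gen_colors
  have hk : size = ((size - 1).toNat : Int) + 1 := by
    unfold Pre_gen_colors at hpre; omega
  rw [hk, pv_genA, pv_genB]
  norm_num
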